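-- pv_equiv track=rewrite | github.com/homebrew9/leetcode_solutions | algorithms/easy/transform_array_by_parity_v1.py | transformArray_2
-- ===== SOURCE A (Python) =====
-- from typing import List
--
-- def transformArray_2(nums: List[int]) -> List[int]:
--     # The two-pointer approach can be further simplified, since we only need to
--     # keep track of either odd or even elements.
--     N = len(nums)
--     res = [0] * N
--     right = N - 1
--     for i in range(N):
--         if nums[i] % 2 == 1:
--             res[right] = 1
--             right -= 1
--     return res
-- ===== SOURCE B (Python) =====
-- from typing import List
--
-- def transformArray_2(nums: List[int]) -> List[int]:
--     # Count odds once, then build the answer by concatenation.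
--     k = sum(1 for x in nums if x % 2 == 1)
--     return [0] * (len(nums) - k) + [1] * k
-- ===== Notes on version B (the rewrite author's own statement) =====
-- stated objective: simpler
-- what changed: Replaces A's scan with indexed placement from the right into a preallocated array by a single count of the odd elements followed by direct construction of the zeros block concatenated with the ones block.
import Mathlib
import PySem

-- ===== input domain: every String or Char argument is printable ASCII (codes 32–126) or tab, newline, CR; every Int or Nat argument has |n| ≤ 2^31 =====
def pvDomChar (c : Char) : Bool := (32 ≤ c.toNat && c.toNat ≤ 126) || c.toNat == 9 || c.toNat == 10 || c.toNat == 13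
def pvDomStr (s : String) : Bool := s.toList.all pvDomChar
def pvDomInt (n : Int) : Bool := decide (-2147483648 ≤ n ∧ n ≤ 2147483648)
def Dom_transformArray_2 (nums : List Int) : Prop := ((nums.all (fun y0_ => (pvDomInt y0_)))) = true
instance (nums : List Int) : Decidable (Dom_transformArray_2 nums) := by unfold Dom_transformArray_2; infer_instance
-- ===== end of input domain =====

-- B replaces A's place-odds-from-the-right indexed loop by counting the odds
-- and building [0]*(n-k) ++ [1]*k directly (objective: simpler).

-- ===== PORT A =====
-- res[right] = 1; right -= 1  (right is nonnegative whenever the assignment runs)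
def transformArray_2 (nums : List Int) : List Int :=
  let N : Int := PySem.List.len nums
  let res : List Int := List.replicate nums.length (0 : Int)
  let st :=
    (PySem.List.pyRange 0 N 1).foldl
      (fun (st : List Int × Int) i =>
        if PySem.Int.mod (PySem.List.pyGetD nums i 0) 2 = 1 then
          (st.1.set st.2.toNat 1, st.2 - 1)
        else st)
      (res, N - 1)
  st.1

-- ===== PORT B =====
-- k = sum(1 for x in nums if x % 2 == 1); return [0]*(len(nums)-k) + [1]*k
def transformArray_2_alt (nums : List Int) : List Int :=
  let k : Nat := nums.countP (fun x => PySem.Int.mod x 2 == 1)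
  List.replicate (nums.length - k) (0 : Int) ++ List.replicate k (1 : Int)

-- ===== PRECONDITION & SPEC =====
def Spec_transformArray_2 (nums : List Int) (out : List Int) : Prop := out = transformArray_2_alt nums
instance (nums : List Int) (out : List Int) : Decidable (Spec_transformArray_2 nums out) := by unfold Spec_transformArray_2; infer_instance

-- ===== CLAIM (what is proved, stated in full; the proofs are below) =====
def Claim_equal_transformArray_2 : Prop := ∀ (nums : List Int), Dom_transformArray_2 nums → Spec_transformArray_2 nums (transformArray_2 nums)

-- ===== LEMMAS AND PROOFS =====

-- setting the last zero of the zero-block turns it into the first one of the one-block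
lemma set_last_zero (z c : Nat) (hz : 1 ≤ z) :
    (List.replicate z (0 : Int) ++ List.replicate c (1 : Int)).set (z - 1) 1
      = List.replicate (z - 1) (0 : Int) ++ List.replicate c.succ (1 : Int) := by
  induction z with
  | zero => omega
  | succ m ih =>
    cases m with
    | zero => simp [List.replicate_succ]
    | succ m' =>
      have h1 : 1 ≤ m' + 1 := by omega
      simp only [List.replicate_succ (n := m' + 1), List.cons_append, List.set, Nat.succ_sub_one]
      have := ih h1
      simp only [Nat.succ_sub_one] at this ⊢
      rw [show m' + 1 = (m' + 1 - 1) + 1 from by omega] at this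
      simpa [List.replicate_succ] using ih h1

-- loop invariant for A's fold over the remaining elements
lemma loop_inv (xs : List Int) (z c : Nat)
    (h : xs.countP (fun x => PySem.Int.mod x 2 == 1) ≤ z) :
    xs.foldl
      (fun (st : List Int × Int) x =>
        if PySem.Int.mod x 2 = 1 then (st.1.set st.2.toNat 1, st.2 - 1) else st)
      (List.replicate z (0 : Int) ++ List.replicate c (1 : Int), (z : Int) - 1)
      = (List.replicate (z - xs.countP (fun x => PySem.Int.mod x 2 == 1)) (0 : Int)
          ++ List.replicate (xs.countP (fun x => PySem.Int.mod x 2 == 1) + c) (1 : Int),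
         (z : Int) - xs.countP (fun x => PySem.Int.mod x 2 == 1) - 1) := by
  induction xs generalizing z c with
  | nil => simp
  | cons x xs ih =>
    have hm : ∀ y : Int, PySem.Int.mod y 2 = y % 2 :=
      fun y => PySem.Int.mod_eq_emod_of_pos (by norm_num)
    by_cases hx : PySem.Int.mod x 2 = 1
    · have hx' : x % 2 = 1 := by rw [← hm]; exact hx
      have hcnt : (x :: xs).countP (fun x => PySem.Int.mod x 2 == 1)
          = xs.countP (fun x => PySem.Int.mod x 2 == 1) + 1 := by
        simp [hx']
      have hz : 1 ≤ z := by omega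
      have hxs : xs.countP (fun x => PySem.Int.mod x 2 == 1) ≤ z - 1 := by omega
      simp only [List.foldl_cons, hx, if_pos]
      have htoNat : ((z : Int) - 1).toNat = z - 1 := by omega
      rw [htoNat, set_last_zero z c hz]
      have hcast : (z : Int) - 1 - 1 = ((z - 1 : Nat) : Int) - 1 := by omega
      rw [hcast, ih (z - 1) c.succ hxs]
      rw [hcnt]
      refine congrArg₂ Prod.mk ?_ ?_
      · rw [show z - 1 - xs.countP (fun x => PySem.Int.mod x 2 == 1)
              = z - (xs.countP (fun x => PySem.Int.mod x 2 == 1) + 1) from by omega,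
            show xs.countP (fun x => PySem.Int.mod x 2 == 1) + c.succ
              = xs.countP (fun x => PySem.Int.mod x 2 == 1) + 1 + c from by omega]
      · omega
    · have hx' : ¬ x % 2 = 1 := by rw [← hm]; exact hx
      have hcnt : (x :: xs).countP (fun x => PySem.Int.mod x 2 == 1)
          = xs.countP (fun x => PySem.Int.mod x 2 == 1) := by
        simp [hx']
      simp only [List.foldl_cons, hx, hcnt]
      exact ih z c (by omega)

-- ===== VERDICT (by name: the statement is the Claim_ definition above) =====
theorem transformArray_2_spec : Claim_equal_transformArray_2 := by
  intro nums _
  unfold Spec_transformArray_2 transformArray_2 transformArray_2_alt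
  simp only [PySem.List.len_eq]
  rw [PySem.List.foldl_pyRange_zero_pyGetD' nums 0
        (fun (st : List Int × Int) x =>
          if PySem.Int.mod x 2 = 1 then (st.1.set st.2.toNat 1, st.2 - 1) else st)
        (List.replicate nums.length (0 : Int), (nums.length : Int) - 1)]
  have h := loop_inv nums nums.length 0 List.countP_le_length
  simpa using congrArg Prod.fst h
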